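-- pv_equiv track=rewrite | github.com/bunburya/bin | screenmgr.py | decide_primary
-- ===== SOURCE A (Python) =====
-- DEFAULT_PRIMARY = 'eDP1'
--
-- def decide_primary(displays, connected):
--     if len(displays) == 1:
--         # if only one display specified and it is connected, it is primary.
--         d = displays[0]
--         if d in connected:
--             return d
--     elif len(connected) == 1:
--         # if only one display is connected and it is specified, it is primary.
--         d = connected.copy().pop()
--         if d in displays:
--             return d
--     elif DEFAULT_PRIMARY in displays and DEFAULT_PRIMARY in connected:
--         # if a defined default is both connected and specified, it is primary.
--         return DEFAULT_PRIMARY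
--     else:
--         # specified display that is connected is primary
--         for d in displays:
--             if d in connected:
--                 return d
--         else:
--             # no primary
--             return None
-- ===== SOURCE B (Python) =====
-- DEFAULT_PRIMARY = 'eDP1'
--
-- def decide_primary(displays, connected):
--     candidates = [d for d in displays if d in connected]
--     if DEFAULT_PRIMARY in candidates:
--         return DEFAULT_PRIMARY
--     return candidates[0] if candidates else None
-- ===== Notes on version B (the rewrite author's own statement) =====
-- stated objective: simpler
-- what changed: Replaces the four-way len(displays)==1 / len(connected)==1 / default / scan branch chain by one filtered candidate list with a single default-priority check, the single-element branches being subsumed.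
import Mathlib
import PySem

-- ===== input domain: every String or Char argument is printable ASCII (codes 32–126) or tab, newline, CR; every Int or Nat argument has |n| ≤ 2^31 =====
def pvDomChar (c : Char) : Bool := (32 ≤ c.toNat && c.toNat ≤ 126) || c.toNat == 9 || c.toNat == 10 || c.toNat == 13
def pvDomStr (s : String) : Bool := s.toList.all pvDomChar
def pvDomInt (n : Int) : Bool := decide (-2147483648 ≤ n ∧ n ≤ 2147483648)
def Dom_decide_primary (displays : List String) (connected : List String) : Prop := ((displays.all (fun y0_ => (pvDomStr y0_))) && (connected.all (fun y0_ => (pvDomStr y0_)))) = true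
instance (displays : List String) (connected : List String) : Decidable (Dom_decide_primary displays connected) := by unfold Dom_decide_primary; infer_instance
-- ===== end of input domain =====

-- B replaces A's len==1 / len==1 / default / scan branch chain by one filtered
-- candidate list plus a single default-priority check (objective: simpler).

-- ===== PORT A =====
def decide_primary (displays : List String) (connected : List String) : Option String :=
  if displays.length = 1 then
    match PySem.List.pyGet? displays 0 with
    | some d => if d ∈ connected then some d else none
    | none => none
  else if connected.length = 1 then
    -- connected.copy().pop() pops the last element of a fresh copy
    match PySem.List.pyGet? connected (-1) with
    | some d => if d ∈ displays then some d else none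
    | none => none
  else if "eDP1" ∈ displays ∧ "eDP1" ∈ connected then some "eDP1"
  else displays.find? (fun d => decide (d ∈ connected))

-- ===== PORT B =====
def decide_primary_alt (displays : List String) (connected : List String) : Option String :=
  let candidates := displays.filter (fun d => decide (d ∈ connected))
  if "eDP1" ∈ candidates then some "eDP1" else candidates.head?

-- ===== PRECONDITION & SPEC =====
def Spec_decide_primary (displays : List String) (connected : List String) (out : Option String) : Prop := out = decide_primary_alt displays connected
instance (displays : List String) (connected : List String) (out : Option String) : Decidable (Spec_decide_primary displays connected out) := by unfold Spec_decide_primary; infer_instance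

-- ===== CLAIM (what is proved, stated in full; the proofs are below) =====
def Claim_equal_decide_primary : Prop := ∀ (displays : List String) (connected : List String), Dom_decide_primary displays connected → Spec_decide_primary displays connected (decide_primary displays connected)

-- ===== LEMMAS AND PROOFS =====

-- B's candidate list starts with exactly the element A's final for-loop finds.
theorem pv_head_filter (l : List String) (p : String → Bool) :
    (l.filter p).head? = l.find? p := by
  induction l with
  | nil => rfl
  | cons x xs ih =>
      by_cases h : p x
      · simp [h]
      · simp [h, ih]

theorem pv_find_mem (displays : List String) (c : String) (hc : c ∈ displays) :
    displays.find? (fun d => decide (d ∈ [c])) = some c := by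
  induction displays with
  | nil => simp at hc
  | cons x xs ih =>
      by_cases hx : x = c
      · simp [hx]
      · have hm : c ∈ xs := by
          rcases List.mem_cons.mp hc with h | h
          · exact absurd h.symm hx
          · exact h
        have hpx : decide (x ∈ [c]) = false := by simp [hx]
        rw [List.find?_cons, hpx, ih hm]

theorem pv_key (displays connected : List String) :
    decide_primary displays connected = decide_primary_alt displays connected := by
  unfold decide_primary decide_primary_alt
  by_cases h1 : displays.length = 1
  · obtain ⟨d, rfl⟩ := List.length_eq_one_iff.mp h1
    by_cases hd : d ∈ connected
    · by_cases he : "eDP1" = d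
      · subst he
        simp [PySem.List.pyGet?, PySem.List.pyIdx?, hd]
      · simp [PySem.List.pyGet?, PySem.List.pyIdx?, hd, he]
    · simp [PySem.List.pyGet?, PySem.List.pyIdx?, hd]
  · by_cases h2 : connected.length = 1
    · obtain ⟨c, rfl⟩ := List.length_eq_one_iff.mp h2
      rw [if_neg h1, if_pos h2, PySem.List.pyGet?_neg_one]
      simp only [List.getLast?_singleton]
      by_cases hc : c ∈ displays
      · by_cases he : "eDP1" ∈ List.filter (fun d => decide (d ∈ [c])) displays
        · have hce : "eDP1" = c := by
            have h := (List.mem_filter.mp he).2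
            simpa using h
          subst hce
          simp [hc]
        · show _ = (if "eDP1" ∈ List.filter (fun d => decide (d ∈ [c])) displays then some "eDP1"
              else (List.filter (fun d => decide (d ∈ [c])) displays).head?)
          rw [if_neg he, pv_head_filter, pv_find_mem displays c hc, if_pos hc]
      · have hf : List.filter (fun d => decide (d ∈ [c])) displays = [] := by
          apply List.filter_eq_nil_iff.mpr
          intro a ha
          simp only [List.mem_singleton, decide_eq_true_eq]
          intro h; exact absurd (h ▸ ha) hc
        have hm : "eDP1" ∉ List.filter (fun d => decide (d ∈ [c])) displays := by
          rw [hf]; simp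
        rw [if_neg hc]
        show _ = (if "eDP1" ∈ List.filter (fun d => decide (d ∈ [c])) displays then some "eDP1"
            else (List.filter (fun d => decide (d ∈ [c])) displays).head?)
        rw [if_neg hm, hf]
        rfl
    · rw [if_neg h1, if_neg h2]
      by_cases h3 : "eDP1" ∈ displays ∧ "eDP1" ∈ connected
      · have hm : "eDP1" ∈ displays.filter (fun d => decide (d ∈ connected)) :=
          List.mem_filter.mpr ⟨h3.1, by simp [h3.2]⟩
        simp [h3, hm]
      · have hm : "eDP1" ∉ displays.filter (fun d => decide (d ∈ connected)) := by
          intro hmem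
          exact h3 ⟨(List.mem_filter.mp hmem).1, by simpa using (List.mem_filter.mp hmem).2⟩
        simp [h3, hm]

-- ===== VERDICT (by name: the statement is the Claim_ definition above) =====
theorem decide_primary_spec : Claim_equal_decide_primary := by
  intro displays connected _
  exact pv_key displays connected
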